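-- pv_equiv track=rewrite | github.com/Glaciohound/VCML | scripts/snippets/gen-sceneGraphs-cub.py | split_sceneGraphs
-- ===== SOURCE A (Python) =====
-- def split_sceneGraphs(sceneGraphs):
--     splits = ('train', 'val', 'test')
--     splits = [
--         [scene for scene in sceneGraphs
--          if scene['split'] == _split]
--         for _split in splits
--     ]
--     return splits
-- ===== SOURCE B (Python) =====
-- def split_sceneGraphs(sceneGraphs):
--     buckets = {}
--     for scene in sceneGraphs:
--         key = scene['split']
--         buckets[key] = buckets.get(key, []) + [scene]
--     return [buckets.get(_split, []) for _split in ('train', 'val', 'test')]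
-- ===== Notes on version B (the rewrite author's own statement) =====
-- stated objective: alternative
-- what changed: A scans the scene list three times, once per split name; B makes a single pass that groups scenes into a dict of lists keyed by scene['split'], then reads the three buckets out of the table.
import Mathlib
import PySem

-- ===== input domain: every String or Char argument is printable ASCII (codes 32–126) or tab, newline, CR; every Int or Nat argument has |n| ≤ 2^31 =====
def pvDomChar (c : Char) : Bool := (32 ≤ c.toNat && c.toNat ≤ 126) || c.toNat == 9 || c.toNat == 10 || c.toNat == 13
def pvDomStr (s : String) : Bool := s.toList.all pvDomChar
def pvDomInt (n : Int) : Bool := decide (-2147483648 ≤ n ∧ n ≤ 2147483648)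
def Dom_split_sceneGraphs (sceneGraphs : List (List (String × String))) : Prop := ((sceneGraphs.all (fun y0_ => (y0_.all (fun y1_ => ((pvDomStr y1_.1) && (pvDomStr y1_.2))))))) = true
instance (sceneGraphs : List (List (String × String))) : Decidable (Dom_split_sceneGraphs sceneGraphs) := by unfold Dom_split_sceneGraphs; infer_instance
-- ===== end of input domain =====

-- B changes the decomposition: one grouping pass into a dict of lists instead of three scans; return values proved equal.

-- scene['split'] as an association-list lookup (first match; none = KeyError)
def sceneSplit (scene : List (String × String)) : Option String :=
  (scene.find? (fun p => p.1 == "split")).map (·.2)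

-- ===== PORT A =====
def split_sceneGraphs (sceneGraphs : List (List (String × String))) : List (List (List (String × String))) :=
  ["train", "val", "test"].map (fun _split =>
    sceneGraphs.filter (fun scene => sceneSplit scene == some _split))

-- ===== PORT B =====
def split_sceneGraphs_alt (sceneGraphs : List (List (String × String))) : List (List (List (String × String))) :=
  let buckets :=
    sceneGraphs.foldl
      (fun d scene => d.modify ((sceneSplit scene).getD "") [] (· ++ [scene]))
      (PySem.Dict.empty : PySem.Dict String (List (List (String × String))))
  ["train", "val", "test"].map (fun _split => buckets.getD _split [])

-- ===== PRECONDITION & SPEC =====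
-- Pre_ excludes exactly the inputs where A (and B) raise KeyError: a scene without a 'split' key.
def Pre_split_sceneGraphs (sceneGraphs : List (List (String × String))) : Prop :=
  (sceneGraphs.all (fun scene => scene.any (fun p => p.1 == "split"))) = true
instance (sceneGraphs : List (List (String × String))) : Decidable (Pre_split_sceneGraphs sceneGraphs) := by unfold Pre_split_sceneGraphs; infer_instance

def pvWitness_split_sceneGraphs : (List (List (String × String))) :=
  [[("split", "train"), ("id", "1")], [("split", "test"), ("id", "2")]]

def Spec_split_sceneGraphs (sceneGraphs : List (List (String × String))) (out : List (List (List (String × String)))) : Prop := out = split_sceneGraphs_alt sceneGraphs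
instance (sceneGraphs : List (List (String × String))) (out : List (List (List (String × String)))) : Decidable (Spec_split_sceneGraphs sceneGraphs out) := by unfold Spec_split_sceneGraphs; infer_instance

-- ===== CLAIM (what is proved, stated in full; the proofs are below) =====
def Claim_equal_split_sceneGraphs : Prop := ∀ (sceneGraphs : List (List (String × String))), Dom_split_sceneGraphs sceneGraphs → Pre_split_sceneGraphs sceneGraphs → Spec_split_sceneGraphs sceneGraphs (split_sceneGraphs sceneGraphs)

-- ===== LEMMAS AND PROOFS =====

-- The grouping loop's bucket for s is exactly the filter of the input on key s.
theorem bucket_eq (xs : List (List (String × String)))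
    (d : PySem.Dict String (List (List (String × String)))) (s : String) :
    (xs.foldl (fun d scene => d.modify ((sceneSplit scene).getD "") [] (· ++ [scene])) d).getD s []
      = d.getD s [] ++ xs.filter (fun scene => (sceneSplit scene).getD "" == s) := by
  induction xs generalizing d with
  | nil => simp
  | cons x xs ih =>
    simp only [List.foldl_cons, List.filter_cons, ih, PySem.Dict.getD_modify]
    by_cases h : s = (sceneSplit x).getD ""
    · simp [h]
    · have h' : ((sceneSplit x).getD "" == s) = false := by
        exact beq_eq_false_iff_ne.mpr (fun e => h e.symm)
      simp [h, h']

theorem split_sceneGraphs_spec_aux (sceneGraphs : List (List (String × String)))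
    (hpre : Pre_split_sceneGraphs sceneGraphs) :
    split_sceneGraphs sceneGraphs = split_sceneGraphs_alt sceneGraphs := by
  unfold split_sceneGraphs split_sceneGraphs_alt
  simp only [List.map]
  have key : ∀ s : String,
      sceneGraphs.filter (fun scene => sceneSplit scene == some s)
        = (sceneGraphs.foldl
            (fun d scene => d.modify ((sceneSplit scene).getD "") [] (· ++ [scene]))
            (PySem.Dict.empty : PySem.Dict String (List (List (String × String))))).getD s [] := by
    intro s
    rw [bucket_eq, PySem.Dict.getD_empty, List.nil_append]
    apply List.filter_congr
    intro scene hmem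
    unfold Pre_split_sceneGraphs at hpre
    rw [List.all_eq_true] at hpre
    have hany := hpre scene hmem
    have hsome : (sceneSplit scene).isSome := by
      unfold sceneSplit
      rw [List.any_eq_true] at hany
      obtain ⟨p, hp, hk⟩ := hany
      have : (scene.find? (fun p => p.1 == "split")).isSome := by
        rw [List.find?_isSome]; exact ⟨p, hp, hk⟩
      simpa using this
    obtain ⟨k, hk⟩ := Option.isSome_iff_exists.mp hsome
    simp [hk]
  rw [key "train", key "val", key "test"]

-- ===== VERDICT (by name: the statement is the Claim_ definition above) =====
theorem split_sceneGraphs_spec : Claim_equal_split_sceneGraphs := by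
  intro sceneGraphs _ hpre
  unfold Spec_split_sceneGraphs
  exact split_sceneGraphs_spec_aux sceneGraphs hpre
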